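-- pv_equiv track=rewrite | github.com/Worse2Worst/Senior-Project | src/checkSol.py | routeToreqs
-- ===== SOURCE A (Python) =====
-- def routeToreqs(route,REQUESTS):
--     reqs = set()
--     for v in route:
--         for i in range(len(REQUESTS)):
--             if int(REQUESTS[i][0])== int(v) or int(REQUESTS[i][1])==int(v):
--                 reqs.add(i)
--     reqs = list(reqs)
--     return reqs
-- ===== SOURCE B (Python) =====
-- def routeToreqs(route, REQUESTS):
--     # Build an index: vertex value -> ascending list of request indices touching it.
--     index = {}
--     for i, r in enumerate(REQUESTS):
--         for x in r[:2]:
--             index.setdefault(int(x), []).append(i)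
--     reqs = set()
--     for v in route:
--         for i in index.get(int(v), []):
--             reqs.add(i)
--     return list(reqs)
-- ===== Notes on version B (the rewrite author's own statement) =====
-- stated objective: faster
-- what changed: Replaces A's route-by-requests double scan with a dict index from vertex value to the ascending list of request indices touching it, built in one pass over REQUESTS, then a single lookup per route vertex.
import Mathlib
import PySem

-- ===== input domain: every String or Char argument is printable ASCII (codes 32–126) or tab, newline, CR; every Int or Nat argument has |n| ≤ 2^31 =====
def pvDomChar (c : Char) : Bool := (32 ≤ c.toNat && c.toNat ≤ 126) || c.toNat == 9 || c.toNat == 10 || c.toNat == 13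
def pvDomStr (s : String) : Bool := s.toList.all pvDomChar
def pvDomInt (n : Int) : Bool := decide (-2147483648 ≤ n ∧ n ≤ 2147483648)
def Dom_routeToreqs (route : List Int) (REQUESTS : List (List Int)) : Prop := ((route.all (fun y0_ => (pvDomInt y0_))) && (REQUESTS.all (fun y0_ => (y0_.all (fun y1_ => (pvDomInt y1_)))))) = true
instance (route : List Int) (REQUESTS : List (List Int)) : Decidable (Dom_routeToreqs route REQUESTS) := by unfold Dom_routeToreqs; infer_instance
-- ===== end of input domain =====

-- B replaces A's route×requests double scan by a dict index (vertex value → ascending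
-- request indices) built in one pass over REQUESTS, then one lookup per route vertex.
-- Output compared as a Python set (list(set(...))); the ports return the set's element list.

-- ===== PORT A =====
def routeToreqs (route : List Int) (REQUESTS : List (List Int)) : List Int :=
  let reqs : PySem.Set Int :=
    route.foldl (fun reqs v =>
      (PySem.List.pyRange 0 (PySem.List.len REQUESTS)).foldl (fun reqs i =>
        if PySem.List.pyGetD (PySem.List.pyGetD REQUESTS i []) 0 0 = v ∨
           PySem.List.pyGetD (PySem.List.pyGetD REQUESTS i []) 1 0 = v
        then PySem.Set.add reqs i else reqs) reqs)
      PySem.Set.empty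
  reqs

-- ===== PORT B =====
def routeToreqs_alt (route : List Int) (REQUESTS : List (List Int)) : List Int :=
  let index : PySem.Dict Int (List Int) :=
    (PySem.List.enumerate REQUESTS).foldl (fun d p =>
      (PySem.List.slice p.2 none (some 2)).foldl
        (fun d x => PySem.Dict.modify d x [] (fun l => l ++ [p.1])) d)
      PySem.Dict.empty
  let reqs : PySem.Set Int :=
    route.foldl (fun s v => (PySem.Dict.getD index v []).foldl PySem.Set.add s) PySem.Set.empty
  reqs

-- ===== PRECONDITION & SPEC =====
-- Pre_ excludes exactly the inputs on which A raises IndexError: a nonempty route together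
-- with a request of fewer than two entries, unless that request is a singleton whose only
-- entry equals every route vertex (then A's or-short-circuit never reaches r[1]).
def Pre_routeToreqs (route : List Int) (REQUESTS : List (List Int)) : Prop :=
  ∀ r ∈ REQUESTS, 2 ≤ r.length ∨ route = [] ∨ (r.length = 1 ∧ ∀ v ∈ route, r.headD 0 = v)
instance (route : List Int) (REQUESTS : List (List Int)) : Decidable (Pre_routeToreqs route REQUESTS) := by unfold Pre_routeToreqs; infer_instance

def pvWitness_routeToreqs : List Int × List (List Int) := ([1, 3], [[1, 2], [4, 3], [5, 6]])

def Spec_routeToreqs (route : List Int) (REQUESTS : List (List Int)) (out : List Int) : Prop := out = routeToreqs_alt route REQUESTS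
instance (route : List Int) (REQUESTS : List (List Int)) (out : List Int) : Decidable (Spec_routeToreqs route REQUESTS out) := by unfold Spec_routeToreqs; infer_instance

-- ===== CLAIM (what is proved, stated in full; the proofs are below) =====
def Claim_equal_routeToreqs : Prop := ∀ (route : List Int) (REQUESTS : List (List Int)), Dom_routeToreqs route REQUESTS → Pre_routeToreqs route REQUESTS → Spec_routeToreqs route REQUESTS (routeToreqs route REQUESTS)

-- ===== LEMMAS AND PROOFS =====

-- per-request contribution to the index at key v: its own index p.1, once per occurrence of v in r[:2]
def pvOcc (v : Int) (p : Int × List Int) : List Int :=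
  ((PySem.List.slice p.2 none (some 2)).filter (fun x => x == v)).map (fun _ => p.1)

theorem pv_modify_fold (xs : List Int) (i : Int) :
    ∀ (d : PySem.Dict Int (List Int)) (v : Int),
      (xs.foldl (fun d x => PySem.Dict.modify d x [] (fun l => l ++ [i])) d).getD v []
        = d.getD v [] ++ (xs.filter (fun x => x == v)).map (fun _ => i) := by
  induction xs with
  | nil => intro d v; simp
  | cons x xs ih =>
    intro d v
    simp only [List.foldl_cons, List.filter_cons]
    by_cases hx : x = v
    · subst hx
      rw [ih, PySem.Dict.getD_modify_self]
      simp [List.append_assoc]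
    · rw [ih, PySem.Dict.getD_modify_of_ne _ _ _ (fun h => hx h.symm)]
      simp [hx]

theorem pv_index_spec (E : List (Int × List Int)) :
    ∀ (d : PySem.Dict Int (List Int)) (v : Int),
      (E.foldl (fun d p =>
          (PySem.List.slice p.2 none (some 2)).foldl
            (fun d x => PySem.Dict.modify d x [] (fun l => l ++ [p.1])) d) d).getD v []
        = d.getD v [] ++ E.flatMap (pvOcc v) := by
  induction E with
  | nil => intro d v; simp
  | cons p E ih =>
    intro d v
    simp only [List.foldl_cons, List.flatMap_cons]
    rw [ih, pv_modify_fold]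
    simp [pvOcc, List.append_assoc]

-- a pair's second component came from REQUESTS
theorem pv_snd_mem {REQUESTS : List (List Int)} {p : Int × List Int}
    (hp : p ∈ PySem.List.enumerate REQUESTS) : p.2 ∈ REQUESTS := by
  rw [PySem.List.mem_enumerate_iff] at hp
  obtain ⟨k, hk, rfl⟩ := hp
  exact List.getElem_mem hk

theorem pv_inner_eq (v : Int) (E : List (Int × List Int))
    (hE : ∀ p ∈ E, 2 ≤ p.2.length ∨ (p.2.length = 1 ∧ p.2.headD 0 = v)) :
    ∀ (s : PySem.Set Int),
      E.foldl (fun s p =>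
          if PySem.List.pyGetD p.2 0 0 = v ∨ PySem.List.pyGetD p.2 1 0 = v
          then PySem.Set.add s p.1 else s) s
        = (E.flatMap (pvOcc v)).foldl PySem.Set.add s := by
  induction E with
  | nil => intro s; simp
  | cons p E ih =>
    intro s
    obtain ⟨i, r⟩ := p
    have hp := hE (i, r) (List.mem_cons_self ..)
    have hrest : ∀ q ∈ E, 2 ≤ q.2.length ∨ (q.2.length = 1 ∧ q.2.headD 0 = v) :=
      fun q hq => hE q (List.mem_cons_of_mem _ hq)
    simp only [List.foldl_cons, List.flatMap_cons, List.foldl_append]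
    rw [ih hrest]
    congr 1
    rcases r with _ | ⟨a, _ | ⟨b, t⟩⟩
    · -- r = [] is excluded by the hypothesis
      simp at hp
    · -- r = [a] with a = v
      have hav : a = v := by simpa using hp
      subst hav
      have hslice : PySem.List.slice [a] none (some 2) = [a] := by
        rw [show ((2 : Int) = ((2 : Nat) : Int)) from rfl, PySem.List.slice_to_natCast]
        simp
      simp only [pvOcc, hslice]
      simp [PySem.List.pyGetD_zero_cons]
    · -- r = a :: b :: t
      have hslice : PySem.List.slice (a :: b :: t) none (some 2) = [a, b] := by
        rw [show ((2 : Int) = ((2 : Nat) : Int)) from rfl, PySem.List.slice_to_natCast]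
        simp [List.take]
      simp only [pvOcc, hslice]
      by_cases ha : a = v <;> by_cases hb : b = v <;>
        simp [PySem.List.pyGetD, ha, hb]

-- ===== VERDICT (by name: the statement is the Claim_ definition above) =====
theorem routeToreqs_spec : Claim_equal_routeToreqs := by
  intro route REQUESTS _ hpre
  unfold Spec_routeToreqs routeToreqs routeToreqs_alt
  refine PySem.List.foldl_congr_mem _ _ _ _ ?_
  intro s v hv
  rw [pv_index_spec, PySem.Dict.getD_empty, List.nil_append]
  have hprop : ∀ p ∈ PySem.List.enumerate REQUESTS,
      2 ≤ p.2.length ∨ (p.2.length = 1 ∧ p.2.headD 0 = v) := by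
    intro p hp
    rcases hpre p.2 (pv_snd_mem hp) with h | h | ⟨h1, h2⟩
    · exact Or.inl h
    · exact absurd hv (by rw [h]; exact List.not_mem_nil)
    · exact Or.inr ⟨h1, h2 v hv⟩
  have hL :
      (PySem.List.pyRange 0 (PySem.List.len REQUESTS)).foldl (fun reqs i =>
        if PySem.List.pyGetD (PySem.List.pyGetD REQUESTS i []) 0 0 = v ∨
           PySem.List.pyGetD (PySem.List.pyGetD REQUESTS i []) 1 0 = v
        then PySem.Set.add reqs i else reqs) s
      = (PySem.List.enumerate REQUESTS).foldl (fun s p =>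
          if PySem.List.pyGetD p.2 0 0 = v ∨ PySem.List.pyGetD p.2 1 0 = v
          then PySem.Set.add s p.1 else s) s := by
    rw [PySem.List.enumerate_eq_map_pyRange REQUESTS [], List.foldl_map]
  rw [hL]
  exact pv_inner_eq v _ hprop s
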